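-- pv_equiv track=rewrite | github.com/JakubOkrzesik/Portfolio | mock_test1/F7.py | bonus
-- ===== SOURCE A (Python) =====
-- def bonus(years):
--
--     money = 0
--
--     x = 1
--
--     while x<=years:
--
--         if x<=5:
--             money += 100
--
--         elif x>5 and x<=8:
--             money += 200
--
--         else:
--             money += 50
--
--         x += 1
--
--     return money
-- ===== SOURCE B (Python) =====
-- def bonus(years):
--     # Closed-form tiered sum: 100 for years 1-5, 200 for years 6-8, 50 afterwards.
--     return (100 * max(0, min(years, 5))
--             + 200 * max(0, min(years, 8) - 5)
--             + 50 * max(0, years - 8))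
-- ===== Notes on version B (the rewrite author's own statement) =====
-- stated objective: faster
-- what changed: Replaced the year-by-year while loop with a piecewise closed-form formula over the three rate tiers.
import Mathlib
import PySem

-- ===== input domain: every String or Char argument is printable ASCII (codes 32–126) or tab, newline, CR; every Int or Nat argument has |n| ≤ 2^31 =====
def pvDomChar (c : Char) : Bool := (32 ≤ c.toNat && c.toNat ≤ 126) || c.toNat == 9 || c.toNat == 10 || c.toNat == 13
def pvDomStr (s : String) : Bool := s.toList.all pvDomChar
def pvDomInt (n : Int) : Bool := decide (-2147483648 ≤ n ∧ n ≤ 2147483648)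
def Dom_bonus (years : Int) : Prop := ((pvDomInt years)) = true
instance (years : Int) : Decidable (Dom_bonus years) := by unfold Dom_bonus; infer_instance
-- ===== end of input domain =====

-- B replaces A's year-by-year while loop with a closed-form formula over the three tiers (objective: faster).

-- ===== PORT A =====
-- while x <= years: add tier amount; x += 1
def bonusLoop (years money x : Int) : Int :=
  if x ≤ years then
    bonusLoop years
      (money + (if x ≤ 5 then 100 else if 5 < x && x ≤ 8 then 200 else 50))
      (x + 1)
  else
    money
termination_by (years + 1 - x).toNat
decreasing_by omega

def bonus (years : Int) : Int := bonusLoop years 0 1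

-- ===== PORT B =====
def bonus_alt (years : Int) : Int :=
  100 * max 0 (min years 5) + 200 * max 0 (min years 8 - 5) + 50 * max 0 (years - 8)

-- ===== PRECONDITION & SPEC =====
def Spec_bonus (years : Int) (out : Int) : Prop := out = bonus_alt years
instance (years : Int) (out : Int) : Decidable (Spec_bonus years out) := by unfold Spec_bonus; infer_instance

-- ===== CLAIM (what is proved, stated in full; the proofs are below) =====
def Claim_equal_bonus : Prop := ∀ (years : Int), Dom_bonus years → Spec_bonus years (bonus years)

-- ===== LEMMAS AND PROOFS =====

-- prefix sum of the tier amounts for the first t years (t ≥ 0)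
def tierSum (t : Int) : Int :=
  100 * max 0 (min t 5) + 200 * max 0 (min t 8 - 5) + 50 * max 0 (t - 8)

lemma tierSum_step (x : Int) (hx : 1 ≤ x) :
    tierSum x - tierSum (x - 1)
      = (if x ≤ 5 then 100 else if 5 < x && x ≤ 8 then 200 else 50) := by
  simp only [tierSum, Bool.and_eq_true, decide_eq_true_eq]
  split_ifs <;> omega

lemma bonusLoop_eq (years : Int) :
    ∀ (n : Nat) (money x : Int), 1 ≤ x → x ≤ years + 1 → (years + 1 - x).toNat = n →
      bonusLoop years money x = money + (tierSum years - tierSum (x - 1)) := by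
  intro n
  induction n with
  | zero =>
    intro money x hx1 hx2 hn
    have hx : x = years + 1 := by omega
    rw [bonusLoop]
    rw [if_neg (by omega)]
    subst hx
    simp
  | succ k ih =>
    intro money x hx1 hx2 hn
    rw [bonusLoop]
    rw [if_pos (by omega)]
    rw [ih _ (x + 1) (by omega) (by omega) (by omega)]
    have h1 := tierSum_step x hx1
    have h2 : x + 1 - 1 = x := by omega
    rw [h2]
    omega

lemma tierSum_zero : tierSum 0 = 0 := by simp [tierSum]

-- ===== VERDICT (by name: the statement is the Claim_ definition above) =====
theorem bonus_spec : Claim_equal_bonus := by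
  intro years _
  show bonus years = bonus_alt years
  unfold bonus
  by_cases h : 1 ≤ years + 1
  · rw [bonusLoop_eq years (years + 1 - 1).toNat 0 1 (by omega) h rfl]
    simp [tierSum_zero]
    rfl
  · rw [bonusLoop, if_neg (by omega)]
    unfold bonus_alt
    omega
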